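-- pv_equiv track=rewrite | github.com/rizqikapratamaa/Tucil1_13522126 | src/tesv1.py | generate_all_paths
-- ===== SOURCE A (Python) =====
-- def generate_all_paths(matrix, buffer_size):
--     if buffer_size == 1:
--         return [[(i, j)] for i in range(len(matrix)) for j in range(len(matrix[0]))]
--     else:
--         smaller_paths = generate_all_paths(matrix, buffer_size - 1)
--         paths = []
--         for path in smaller_paths:
--             i, j = path[-1]
--             if len(path) % 2 == 1:
--                 # We move horizontally
--                 for new_j in range(len(matrix[0])):
--                     if new_j != j:
--                         paths.append(path + [(i, new_j)])
--             else:
--                 # We move vertically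
--                 for new_i in range(len(matrix)):
--                     if new_i != i:
--                         paths.append(path + [(new_i, j)])
--         return paths
-- ===== SOURCE B (Python) =====
-- def generate_all_paths(matrix, buffer_size):
--     rows = len(matrix)
--     cols = len(matrix[0]) if matrix else 0
--     results = []
--     stack = []
--     for i in range(rows - 1, -1, -1):
--         for j in range(cols - 1, -1, -1):
--             stack.append([(i, j)])
--     while stack:
--         path = stack.pop()
--         if len(path) == buffer_size:
--             results.append(path)
--         elif len(path) < buffer_size:
--             i, j = path[-1]
--             if len(path) % 2 == 1:
--                 for nj in range(cols - 1, -1, -1):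
--                     if nj != j:
--                         stack.append(path + [(i, nj)])
--             else:
--                 for ni in range(rows - 1, -1, -1):
--                     if ni != i:
--                         stack.append(path + [(ni, j)])
--     return results
-- ===== Notes on version B (the rewrite author's own statement) =====
-- stated objective: alternative
-- what changed: Replaces A's level-by-level recursion (materialising the full list of all shorter paths and extending every one) with an explicit-stack depth-first search that completes one path at a time, seeded cell by cell in row-major order (same output list, same order).
import Mathlib
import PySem

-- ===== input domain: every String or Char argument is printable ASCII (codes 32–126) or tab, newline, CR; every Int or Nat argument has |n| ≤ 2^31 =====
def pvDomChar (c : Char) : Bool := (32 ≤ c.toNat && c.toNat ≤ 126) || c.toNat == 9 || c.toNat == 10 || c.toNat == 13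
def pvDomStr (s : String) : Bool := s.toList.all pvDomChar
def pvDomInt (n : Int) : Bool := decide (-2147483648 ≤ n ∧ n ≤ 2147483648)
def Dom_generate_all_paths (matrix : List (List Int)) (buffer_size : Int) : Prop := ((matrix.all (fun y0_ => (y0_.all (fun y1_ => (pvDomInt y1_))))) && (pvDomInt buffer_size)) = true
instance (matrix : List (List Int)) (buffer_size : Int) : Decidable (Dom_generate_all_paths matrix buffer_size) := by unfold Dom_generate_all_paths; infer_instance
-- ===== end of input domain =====

-- B replaces A's level-by-level regeneration of all shorter paths with an explicit-stack
-- depth-first search seeded cell by cell (same output list, same order).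

-- ===== PORT A =====
-- literal port of A: recursive level construction; for buffer_size < 1 the Python
-- recursion never reaches the base case (RecursionError) — excluded by Pre_, the
-- 'buffer_size < 1 → []' branch is only a totality guard for that excluded region.
def generate_all_paths (matrix : List (List Int)) (buffer_size : Int) : List (List (Int × Int)) :=
  let rows : Int := matrix.length
  let cols : Int := match matrix with | [] => 0 | r :: _ => (r.length : Int)  -- len(matrix[0]); only read when matrix ≠ []
  if buffer_size = 1 then
    (PySem.List.pyRange 0 rows 1).flatMap (fun i => (PySem.List.pyRange 0 cols 1).map (fun j => [(i, j)]))
  else if buffer_size < 1 then []  -- unreachable under Pre_ (Python diverges here)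
  else
    let smaller := generate_all_paths matrix (buffer_size - 1)
    smaller.foldl (fun paths path =>
      let ij := (PySem.List.pyGet? path (-1)).getD (0, 0)  -- i, j = path[-1]; path is never empty
      if path.length % 2 == 1 then
        (PySem.List.pyRange 0 cols 1).foldl (fun acc new_j =>
          if new_j != ij.2 then acc ++ [path ++ [(ij.1, new_j)]] else acc) paths
      else
        (PySem.List.pyRange 0 rows 1).foldl (fun acc new_i =>
          if new_i != ij.1 then acc ++ [path ++ [(new_i, ij.2)]] else acc) paths) []
termination_by buffer_size.toNat
decreasing_by omega

-- ===== PORT B =====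
-- Fuel bookkeeping for the while-loop of Source B (a totality guard only: the fuel computed
-- below provably bounds the number of loop iterations; the weights are capped so the fuel
-- is cheap whenever the search dies out early).
def pvExp (rows cols bs : Int) (p : List (Int × Int)) : Nat :=
  let d := (bs - (p.length : Int)).toNat
  if 2 ≤ rows ∧ 2 ≤ cols then d
  else if p.length % 2 == 1 then (if 2 ≤ cols then min d 2 else min d 1)
  else (if 2 ≤ rows then min d 2 else min d 1)

def pvWeight (rows cols bs : Int) (p : List (Int × Int)) : Nat :=
  (max rows.toNat cols.toNat + 1) ^ pvExp rows cols bs p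

def pvMeasure (rows cols bs : Int) (stack : List (List (Int × Int))) : Nat :=
  (stack.map (pvWeight rows cols bs)).sum

-- literal port of Source B's while-loop: the Python stack's top (end of the list) is the
-- HEAD of this list (append = cons, pop = take the head), so the traversal order is
-- identical; the Nat fuel is a totality guard, never exhausted (lemma pvLoop_eq below)
def pvLoop (rows cols bs : Int) : Nat → List (List (Int × Int)) → List (List (Int × Int)) → List (List (Int × Int))
  | _, results, [] => results
  | 0, results, _ :: _ => results  -- fuel guard: unreachable, the seeded fuel bounds the iterations
  | fuel + 1, results, path :: rest =>
    if (path.length : Int) = bs then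
      pvLoop rows cols bs fuel (results ++ [path]) rest
    else if (path.length : Int) < bs then
      let ij := (PySem.List.pyGet? path (-1)).getD (0, 0)  -- i, j = path[-1]; path is never empty
      let rest' :=
        if path.length % 2 == 1 then
          (PySem.List.pyRange (cols - 1) (-1) (-1)).foldl
            (fun st nj => if nj != ij.2 then (path ++ [(ij.1, nj)]) :: st else st) rest
        else
          (PySem.List.pyRange (rows - 1) (-1) (-1)).foldl
            (fun st ni => if ni != ij.1 then (path ++ [(ni, ij.2)]) :: st else st) rest
      pvLoop rows cols bs fuel results rest'
    else
      pvLoop rows cols bs fuel results rest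

def generate_all_paths_alt (matrix : List (List Int)) (buffer_size : Int) : List (List (Int × Int)) :=
  let rows : Int := matrix.length
  let cols : Int := match matrix with | [] => 0 | r :: _ => (r.length : Int)
  let stack :=
    (PySem.List.pyRange (rows - 1) (-1) (-1)).foldl (fun st i =>
      (PySem.List.pyRange (cols - 1) (-1) (-1)).foldl (fun st j => [(i, j)] :: st) st) []
  pvLoop rows cols buffer_size (pvMeasure rows cols buffer_size stack) [] stack

-- ===== PRECONDITION & SPEC =====
-- Pre_ excludes buffer_size < 1, where A never reaches its base case and raises RecursionError.
def Pre_generate_all_paths (matrix : List (List Int)) (buffer_size : Int) : Prop := 1 ≤ buffer_size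
instance (matrix : List (List Int)) (buffer_size : Int) : Decidable (Pre_generate_all_paths matrix buffer_size) := by unfold Pre_generate_all_paths; infer_instance
def pvWitness_generate_all_paths : List (List Int) × Int := ([[1, 2], [3, 4]], 3)

def Spec_generate_all_paths (matrix : List (List Int)) (buffer_size : Int) (out : List (List (Int × Int))) : Prop := out = generate_all_paths_alt matrix buffer_size
instance (matrix : List (List Int)) (buffer_size : Int) (out : List (List (Int × Int))) : Decidable (Spec_generate_all_paths matrix buffer_size out) := by unfold Spec_generate_all_paths; infer_instance

-- ===== CLAIM (what is proved, stated in full; the proofs are below) =====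
def Claim_equal_generate_all_paths : Prop := ∀ (matrix : List (List Int)) (buffer_size : Int), Dom_generate_all_paths matrix buffer_size → Pre_generate_all_paths matrix buffer_size → Spec_generate_all_paths matrix buffer_size (generate_all_paths matrix buffer_size)

-- ===== LEMMAS AND PROOFS =====

-- proof-only abstractions: the one-step extensions of a path, all k-step completions,
-- the seed paths in row-major order, and the completions a stack entry contributes
def pvExtensions (rows cols : Int) (path : List (Int × Int)) : List (Int × Int) :=
  let ij := (PySem.List.pyGet? path (-1)).getD (0, 0)
  if path.length % 2 == 1 then
    ((PySem.List.pyRange 0 cols 1).filter (fun nj => nj != ij.2)).map (fun nj => (ij.1, nj))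
  else
    ((PySem.List.pyRange 0 rows 1).filter (fun ni => ni != ij.1)).map (fun ni => (ni, ij.2))

def pvStep (rows cols : Int) (path : List (Int × Int)) : List (List (Int × Int)) :=
  (pvExtensions rows cols path).map (fun c => path ++ [c])

def pvComp (rows cols : Int) : Nat → List (Int × Int) → List (List (Int × Int))
  | 0, p => [p]
  | k + 1, p => (pvStep rows cols p).flatMap (pvComp rows cols k)

def pvSeeds (rows cols : Int) : List (List (Int × Int)) :=
  (PySem.List.pyRange 0 rows 1).flatMap (fun i => (PySem.List.pyRange 0 cols 1).map (fun j => [(i, j)]))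

def pvG (rows cols bs : Int) (p : List (Int × Int)) : List (List (Int × Int)) :=
  if (p.length : Int) ≤ bs then pvComp rows cols (bs - (p.length : Int)).toNat p else []

lemma pvFoldlConsIf {α : Type} (f : Int → α) (pred : Int → Bool) :
    ∀ (l : List Int) (st : List α),
      l.foldl (fun st x => if pred x then f x :: st else st) st = ((l.filter pred).map f).reverse ++ st := by
  intro l
  induction l with
  | nil => simp
  | cons x xs ih =>
    intro st
    by_cases h : pred x <;> simp [h, ih, List.append_assoc]

-- the reversed-range cons-pushes put exactly the ascending one-step extensions on top
lemma pvRest'_eq (cols : Int) (path : List (Int × Int)) (rest : List (List (Int × Int)))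
    (j : Int) (f : Int → Int × Int) :
    (PySem.List.pyRange (cols - 1) (-1) (-1)).foldl
        (fun st x => if x != j then (path ++ [f x]) :: st else st) rest
      = (((PySem.List.pyRange 0 cols 1).filter (fun x => x != j)).map (fun x => path ++ [f x])) ++ rest := by
  rw [pvFoldlConsIf]
  rw [PySem.List.pyRange_neg_one_eq_reverse]
  simp [List.filter_reverse, List.map_reverse]

-- well-formed stack entry: nonempty, last cell inside the grid
def pvWF (rows cols : Int) (p : List (Int × Int)) : Prop :=
  match p.getLast? with
  | none => False
  | some (i, j) => 0 ≤ i ∧ i < rows ∧ 0 ≤ j ∧ j < cols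

lemma pvWeight_pos (rows cols bs : Int) (p : List (Int × Int)) : 0 < pvWeight rows cols bs p :=
  Nat.pow_pos (by omega)

-- a pushed child's capped exponent is strictly below its parent's
lemma pvExp_child_lt (rows cols bs : Int) (path : List (Int × Int)) (c : Int × Int)
    (hlt : (path.length : Int) < bs)
    (hdim : if path.length % 2 == 1 then 2 ≤ cols else 2 ≤ rows) :
    pvExp rows cols bs (path ++ [c]) < pvExp rows cols bs path := by
  unfold pvExp
  have hlen : (path ++ [c]).length = path.length + 1 := by simp
  by_cases hfull : 2 ≤ rows ∧ 2 ≤ cols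
  · simp only [hlen, if_pos hfull]
    omega
  · rcases Nat.mod_two_eq_zero_or_one path.length with hpar | hpar
    · have hp1 : (path.length % 2 == 1) = false := by simp [hpar]
      have hp2 : ((path.length + 1) % 2 == 1) = true := by simp [Nat.add_mod, hpar]
      have hdim' : 2 ≤ rows := by simpa [hp1] using hdim
      have hc2 : ¬ 2 ≤ cols := fun h => hfull ⟨hdim', h⟩
      simp only [hlen, if_neg hfull, hp1, hp2, Bool.false_eq_true, if_true, if_false,
        if_neg hc2, if_pos hdim']
      omega
    · have hp1 : (path.length % 2 == 1) = true := by simp [hpar]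
      have hp2 : ((path.length + 1) % 2 == 1) = false := by simp [Nat.add_mod, hpar]
      have hdim' : 2 ≤ cols := by simpa [hp1] using hdim
      have hr2 : ¬ 2 ≤ rows := fun h => hfull ⟨h, hdim'⟩
      simp only [hlen, if_neg hfull, hp1, hp2, Bool.false_eq_true, if_true, if_false,
        if_neg hr2, if_pos hdim']
      omega

-- popping an entry and pushing children with strictly smaller exponents shrinks the measure
lemma pvMeasure_children_lt (rows cols bs : Int) (path : List (Int × Int))
    (children rest : List (List (Int × Int)))
    (hcount : children.length ≤ max rows.toNat cols.toNat)
    (hexp : ∀ c ∈ children, pvExp rows cols bs c < pvExp rows cols bs path) :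
    pvMeasure rows cols bs (children ++ rest) < pvMeasure rows cols bs (path :: rest) := by
  unfold pvMeasure
  rw [List.map_append, List.sum_append, List.map_cons, List.sum_cons]
  have hK : 0 < max rows.toNat cols.toNat + 1 := by omega
  rcases children with _ | ⟨c0, cs⟩
  · have := pvWeight_pos rows cols bs path
    simp
    omega
  · have hep : 1 ≤ pvExp rows cols bs path := by
      have := hexp c0 (by simp)
      omega
    have hbound : ∀ c ∈ c0 :: cs, pvWeight rows cols bs c
        ≤ (max rows.toNat cols.toNat + 1) ^ (pvExp rows cols bs path - 1) := by
      intro c hc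
      exact Nat.pow_le_pow_right (by omega) (by have := hexp c hc; omega)
    have hsum : ((c0 :: cs).map (pvWeight rows cols bs)).sum
        ≤ (c0 :: cs).length * (max rows.toNat cols.toNat + 1) ^ (pvExp rows cols bs path - 1) := by
      calc ((c0 :: cs).map (pvWeight rows cols bs)).sum
          ≤ ((c0 :: cs).map (fun _ => (max rows.toNat cols.toNat + 1) ^ (pvExp rows cols bs path - 1))).sum :=
            List.sum_le_sum hbound
        _ = (c0 :: cs).length * (max rows.toNat cols.toNat + 1) ^ (pvExp rows cols bs path - 1) := by
            rw [List.map_const', List.sum_replicate, smul_eq_mul]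
    have hlt : (c0 :: cs).length * (max rows.toNat cols.toNat + 1) ^ (pvExp rows cols bs path - 1)
        < pvWeight rows cols bs path := by
      unfold pvWeight
      calc (c0 :: cs).length * (max rows.toNat cols.toNat + 1) ^ (pvExp rows cols bs path - 1)
          < (max rows.toNat cols.toNat + 1) * (max rows.toNat cols.toNat + 1) ^ (pvExp rows cols bs path - 1) :=
            Nat.mul_lt_mul_of_lt_of_le (by omega) (le_refl _) (Nat.pow_pos (by omega))
        _ = (max rows.toNat cols.toNat + 1) ^ (pvExp rows cols bs path - 1 + 1) := by ring
        _ = (max rows.toNat cols.toNat + 1) ^ pvExp rows cols bs path := by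
            rw [Nat.sub_add_cancel hep]
    omega

-- each stack entry contributes its completions; the loop drains them in order
lemma pvLoop_eq (rows cols bs : Int) : ∀ (fuel : Nat) (results stack : List (List (Int × Int))),
    (∀ p ∈ stack, pvWF rows cols p) → pvMeasure rows cols bs stack ≤ fuel →
    pvLoop rows cols bs fuel results stack = results ++ stack.flatMap (pvG rows cols bs) := by
  intro fuel
  induction fuel with
  | zero =>
    intro results stack hwf hfuel
    cases stack with
    | nil => simp [pvLoop]
    | cons path rest =>
      exfalso
      have h1 : 0 < pvMeasure rows cols bs (path :: rest) := by
        unfold pvMeasure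
        have := pvWeight_pos rows cols bs path
        simp
        omega
      omega
  | succ fuel ih =>
    intro results stack hwf hfuel
    cases stack with
    | nil => simp [pvLoop]
    | cons path rest =>
      have hwpos := pvWeight_pos rows cols bs path
      have hmcons : pvMeasure rows cols bs (path :: rest)
          = pvWeight rows cols bs path + pvMeasure rows cols bs rest := by
        unfold pvMeasure; simp
      rw [pvLoop]
      by_cases h1 : (path.length : Int) = bs
      · rw [if_pos h1, ih (results ++ [path]) rest (fun p hp => hwf p (by simp [hp])) (by omega)]
        have : pvG rows cols bs path = [path] := by
          unfold pvG
          rw [if_pos (by omega)]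
          have : (bs - (path.length : Int)).toNat = 0 := by omega
          rw [this, pvComp]
        simp [this]
      · rw [if_neg h1]
        by_cases h2 : (path.length : Int) < bs
        · rw [if_pos h2]
          dsimp only
          -- the popped path is well-formed: its last cell exists and is in range
          have hwfp := hwf path (by simp)
          obtain ⟨lp, hlast⟩ : ∃ lp, path.getLast? = some lp := by
            unfold pvWF at hwfp
            cases hl : path.getLast? with
            | none => rw [hl] at hwfp; exact absurd hwfp not_false
            | some lp => exact ⟨lp, rfl⟩
          have hij : (PySem.List.pyGet? path (-1)).getD (0, 0) = lp := by
            rw [PySem.List.pyGet?_neg_one, hlast]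
            rfl
          have hbounds : 0 ≤ lp.1 ∧ lp.1 < rows ∧ 0 ≤ lp.2 ∧ lp.2 < cols := by
            unfold pvWF at hwfp
            rw [hlast] at hwfp
            exact ⟨hwfp.1, hwfp.2.1, hwfp.2.2.1, hwfp.2.2.2⟩
          rw [hij]
          -- children facts, per parity branch
          have hd : (bs - (path.length : Int)).toNat = ((bs - (path.length : Int)).toNat - 1) + 1 := by omega
          have hcomp : ∀ (c : Int × Int),
              pvG rows cols bs (path ++ [c]) = pvComp rows cols ((bs - (path.length : Int)).toNat - 1) (path ++ [c]) := by
            intro c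
            unfold pvG
            rw [if_pos (by simp; omega)]
            congr 1
            simp
            omega
          have hg : pvG rows cols bs path = pvComp rows cols (bs - (path.length : Int)).toNat path := by
            unfold pvG
            rw [if_pos (by omega)]
          have hstep : pvG rows cols bs path = (pvStep rows cols path).flatMap (pvG rows cols bs) := by
            rw [hg, hd, pvComp]
            unfold pvStep
            rw [List.flatMap_map, List.flatMap_map]
            congr 1
            funext c
            rw [hcomp]
          cases hpar : (path.length % 2 == 1) with
          | true =>
            rw [if_pos rfl, pvRest'_eq]
            have hcols2 : 2 ≤ cols → True := fun _ => trivial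
            have hwf' : ∀ p ∈ (((PySem.List.pyRange 0 cols 1).filter (fun x => x != lp.2)).map
                (fun x => path ++ [(lp.1, x)])) ++ rest, pvWF rows cols p := by
              intro p hp
              rcases List.mem_append.mp hp with hp | hp
              · obtain ⟨x, hx, rfl⟩ := List.mem_map.mp hp
                have hxr : x ∈ PySem.List.pyRange 0 cols 1 := List.mem_of_mem_filter hx
                have hxb := (PySem.List.mem_pyRange_one).mp hxr
                unfold pvWF
                rw [List.getLast?_concat]
                exact ⟨hbounds.1, hbounds.2.1, hxb.1, hxb.2⟩
              · exact hwf p (by simp [hp])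
            have hexp : ∀ c ∈ (((PySem.List.pyRange 0 cols 1).filter (fun x => x != lp.2)).map
                (fun x => path ++ [(lp.1, x)])), pvExp rows cols bs c < pvExp rows cols bs path := by
              intro c hc
              obtain ⟨x, hx, rfl⟩ := List.mem_map.mp hc
              have hxr : x ∈ PySem.List.pyRange 0 cols 1 := List.mem_of_mem_filter hx
              have hxb := (PySem.List.mem_pyRange_one).mp hxr
              have hxne : x ≠ lp.2 := by
                have := List.of_mem_filter hx
                simpa using this
              have h2c : 2 ≤ cols := by
                rcases hbounds with ⟨_, _, hj0, hjc⟩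
                omega
              exact pvExp_child_lt rows cols bs path _ h2 (by rw [hpar]; exact h2c)
            have hcount : ((((PySem.List.pyRange 0 cols 1).filter (fun x => x != lp.2)).map
                (fun x => path ++ [(lp.1, x)]))).length ≤ max rows.toNat cols.toNat := by
              rw [List.length_map]
              calc ((PySem.List.pyRange 0 cols 1).filter (fun x => x != lp.2)).length
                  ≤ (PySem.List.pyRange 0 cols 1).length := List.length_filter_le _ _
                _ = (cols - 0).toNat := PySem.List.length_pyRange_one 0 cols
                _ ≤ max rows.toNat cols.toNat := by omega
            rw [ih results _ hwf' (by
              have := pvMeasure_children_lt rows cols bs path _ rest hcount hexp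
              omega)]
            have hch : pvStep rows cols path = ((PySem.List.pyRange 0 cols 1).filter (fun x => x != lp.2)).map
                (fun x => path ++ [(lp.1, x)]) := by
              unfold pvStep pvExtensions
              dsimp only
              rw [hij, if_pos hpar, List.map_map]
              rfl
            rw [List.flatMap_append, List.flatMap_cons, hstep, hch]
          | false =>
            rw [if_neg (by simp), pvRest'_eq]
            have hwf' : ∀ p ∈ (((PySem.List.pyRange 0 rows 1).filter (fun x => x != lp.1)).map
                (fun x => path ++ [(x, lp.2)])) ++ rest, pvWF rows cols p := by
              intro p hp
              rcases List.mem_append.mp hp with hp | hp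
              · obtain ⟨x, hx, rfl⟩ := List.mem_map.mp hp
                have hxr : x ∈ PySem.List.pyRange 0 rows 1 := List.mem_of_mem_filter hx
                have hxb := (PySem.List.mem_pyRange_one).mp hxr
                unfold pvWF
                rw [List.getLast?_concat]
                exact ⟨hxb.1, hxb.2, hbounds.2.2.1, hbounds.2.2.2⟩
              · exact hwf p (by simp [hp])
            have hexp : ∀ c ∈ (((PySem.List.pyRange 0 rows 1).filter (fun x => x != lp.1)).map
                (fun x => path ++ [(x, lp.2)])), pvExp rows cols bs c < pvExp rows cols bs path := by
              intro c hc
              obtain ⟨x, hx, rfl⟩ := List.mem_map.mp hc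
              have hxr : x ∈ PySem.List.pyRange 0 rows 1 := List.mem_of_mem_filter hx
              have hxb := (PySem.List.mem_pyRange_one).mp hxr
              have hxne : x ≠ lp.1 := by
                have := List.of_mem_filter hx
                simpa using this
              have h2r : 2 ≤ rows := by
                rcases hbounds with ⟨hi0, hir, _, _⟩
                omega
              exact pvExp_child_lt rows cols bs path _ h2 (by rw [hpar]; exact h2r)
            have hcount : ((((PySem.List.pyRange 0 rows 1).filter (fun x => x != lp.1)).map
                (fun x => path ++ [(x, lp.2)]))).length ≤ max rows.toNat cols.toNat := by
              rw [List.length_map]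
              calc ((PySem.List.pyRange 0 rows 1).filter (fun x => x != lp.1)).length
                  ≤ (PySem.List.pyRange 0 rows 1).length := List.length_filter_le _ _
                _ = (rows - 0).toNat := PySem.List.length_pyRange_one 0 rows
                _ ≤ max rows.toNat cols.toNat := by omega
            rw [ih results _ hwf' (by
              have := pvMeasure_children_lt rows cols bs path _ rest hcount hexp
              omega)]
            have hch : pvStep rows cols path = ((PySem.List.pyRange 0 rows 1).filter (fun x => x != lp.1)).map
                (fun x => path ++ [(x, lp.2)]) := by
              unfold pvStep pvExtensions
              dsimp only
              rw [hij, if_neg (by simp [hpar]), List.map_map]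
              rfl
            rw [List.flatMap_append, List.flatMap_cons, hstep, hch]
        · rw [if_neg h2, ih results rest (fun p hp => hwf p (by simp [hp])) (by omega)]
          have : pvG rows cols bs path = [] := by
            unfold pvG
            rw [if_neg (by omega)]
          simp [this]

lemma pvFoldlCons {α β : Type} (f : β → α) :
    ∀ (l : List β) (st : List α), l.foldl (fun st x => f x :: st) st = (l.map f).reverse ++ st := by
  intro l
  induction l with
  | nil => simp
  | cons x xs ih => intro st; simp [ih, List.append_assoc]

lemma pvFoldlBlocks {α : Type} (g : Int → List α) :
    ∀ (l : List Int) (st : List α), l.foldl (fun st x => g x ++ st) st = l.reverse.flatMap g ++ st := by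
  intro l
  induction l with
  | nil => simp
  | cons x xs ih => intro st; simp [ih]

-- the seed-building double loop yields the row-major seed paths
lemma pvStack0_eq (rows cols : Int) :
    (PySem.List.pyRange (rows - 1) (-1) (-1)).foldl (fun st i =>
      (PySem.List.pyRange (cols - 1) (-1) (-1)).foldl (fun st j => [(i, j)] :: st) st) []
      = pvSeeds rows cols := by
  have hinner : ∀ (i : Int) (st : List (List (Int × Int))),
      (PySem.List.pyRange (cols - 1) (-1) (-1)).foldl (fun st j => [(i, j)] :: st) st
        = (PySem.List.pyRange 0 cols 1).map (fun j => [(i, j)]) ++ st := by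
    intro i st
    rw [pvFoldlCons, PySem.List.pyRange_neg_one_eq_reverse]
    simp [List.map_reverse]
  have : (fun (st : List (List (Int × Int))) (i : Int) =>
      (PySem.List.pyRange (cols - 1) (-1) (-1)).foldl (fun st j => [(i, j)] :: st) st)
      = (fun st i => ((PySem.List.pyRange 0 cols 1).map (fun j => [(i, j)])).reverse.reverse ++ st) := by
    funext st i
    rw [hinner, List.reverse_reverse]
  rw [this]
  have := pvFoldlBlocks (fun i => ((PySem.List.pyRange 0 cols 1).map (fun j => [(i, j)])).reverse.reverse)
    (PySem.List.pyRange (rows - 1) (-1) (-1)) []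
  rw [this, PySem.List.pyRange_neg_one_eq_reverse]
  simp [pvSeeds]

lemma pvSeeds_wf (rows cols : Int) : ∀ p ∈ pvSeeds rows cols, pvWF rows cols p := by
  intro p hp
  unfold pvSeeds at hp
  obtain ⟨i, hi, hp⟩ := List.mem_flatMap.mp hp
  obtain ⟨j, hj, rfl⟩ := List.mem_map.mp hp
  have hib := (PySem.List.mem_pyRange_one).mp hi
  have hjb := (PySem.List.mem_pyRange_one).mp hj
  unfold pvWF
  simp only [List.getLast?_singleton]
  exact ⟨hib.1, hib.2, hjb.1, hjb.2⟩

lemma pvB_eq (matrix : List (List Int)) (bs : Int) (hbs : 1 ≤ bs) :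
    generate_all_paths_alt matrix bs
      = (pvSeeds matrix.length (match matrix with | [] => 0 | r :: _ => (r.length : Int))).flatMap
          (pvComp matrix.length (match matrix with | [] => 0 | r :: _ => (r.length : Int)) (bs - 1).toNat) := by
  rw [generate_all_paths_alt.eq_def]
  dsimp only
  rw [pvStack0_eq, pvLoop_eq _ _ _ _ _ _ (pvSeeds_wf _ _) (le_refl _)]
  rw [List.nil_append]
  simp only [pvSeeds, List.flatMap_assoc]
  congr 1
  funext i
  rw [List.flatMap_map, List.flatMap_map]
  congr 1
  funext j
  unfold pvG
  rw [if_pos (by simp; omega)]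
  congr 1

-- A's loop body over one level equals appending the one-step extensions
lemma pvFoldlA_eq (rows cols : Int) : ∀ (L : List (List (Int × Int))) paths,
    L.foldl (fun paths path =>
      let ij := (PySem.List.pyGet? path (-1)).getD (0, 0)
      if path.length % 2 == 1 then
        (PySem.List.pyRange 0 cols 1).foldl (fun acc new_j =>
          if new_j != ij.2 then acc ++ [path ++ [(ij.1, new_j)]] else acc) paths
      else
        (PySem.List.pyRange 0 rows 1).foldl (fun acc new_i =>
          if new_i != ij.1 then acc ++ [path ++ [(new_i, ij.2)]] else acc) paths) paths
      = paths ++ L.flatMap (pvStep rows cols) := by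
  intro L
  induction L with
  | nil => simp
  | cons p ps ihl =>
    intro paths
    simp only [List.foldl_cons, List.flatMap_cons]
    rw [ihl]
    have hbody : ∀ (q : List (List (Int × Int))),
        (let ij := (PySem.List.pyGet? p (-1)).getD (0, 0)
         if p.length % 2 == 1 then
           (PySem.List.pyRange 0 cols 1).foldl (fun acc new_j =>
             if new_j != ij.2 then acc ++ [p ++ [(ij.1, new_j)]] else acc) q
         else
           (PySem.List.pyRange 0 rows 1).foldl (fun acc new_i =>
             if new_i != ij.1 then acc ++ [p ++ [(new_i, ij.2)]] else acc) q)
          = q ++ pvStep rows cols p := by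
      intro q
      unfold pvStep pvExtensions
      dsimp only
      cases h : (p.length % 2 == 1) with
      | true =>
        rw [if_pos rfl, if_pos rfl, PySem.List.foldl_append_if]
        simp [Function.comp]
      | false =>
        rw [if_neg (by simp), if_neg (by simp), PySem.List.foldl_append_if]
        simp [Function.comp]
    rw [hbody, List.append_assoc]

-- one step after k steps = k steps after one step (both are the (k+1)-step completions)
lemma pvSwap (rows cols : Int) : ∀ (k : Nat) (p : List (Int × Int)),
    (pvComp rows cols k p).flatMap (pvStep rows cols)
      = (pvStep rows cols p).flatMap (pvComp rows cols k) := by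
  intro k
  induction k with
  | zero => intro p; simp [pvComp]
  | succ k ih =>
    intro p
    show ((pvStep rows cols p).flatMap (pvComp rows cols k)).flatMap (pvStep rows cols) = _
    rw [List.flatMap_assoc]
    simp only [ih]
    rfl

lemma pvA_eq (matrix : List (List Int)) : ∀ (k : Nat) (bs : Int), bs = (k : Int) + 1 →
    generate_all_paths matrix bs
      = (pvSeeds matrix.length (match matrix with | [] => 0 | r :: _ => (r.length : Int))).flatMap
          (pvComp matrix.length (match matrix with | [] => 0 | r :: _ => (r.length : Int)) k) := by
  intro k
  induction k with
  | zero =>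
    intro bs hbs
    rw [generate_all_paths.eq_def, if_pos (by omega)]
    simp [pvSeeds, pvComp]
  | succ k ih =>
    intro bs hbs
    rw [generate_all_paths.eq_def, if_neg (by omega), if_neg (by omega)]
    simp only []
    rw [pvFoldlA_eq, ih (bs - 1) (by omega)]
    simp only [List.nil_append, List.flatMap_assoc]
    congr 1
    funext p
    rw [pvSwap]
    rfl

-- ===== VERDICT (by name: the statement is the Claim_ definition above) =====
theorem generate_all_paths_spec : Claim_equal_generate_all_paths := by
  intro matrix bs _ hpre
  unfold Spec_generate_all_paths
  have hk : bs = ((bs - 1).toNat : Int) + 1 := by unfold Pre_generate_all_paths at hpre; omega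
  rw [pvA_eq matrix (bs - 1).toNat bs hk, pvB_eq matrix bs (by unfold Pre_generate_all_paths at hpre; omega)]
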